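-- pv_equiv track=rewrite | github.com/oib/AITBC | aitbc/state.py | check_for_orphans
-- ===== SOURCE A (Python) =====
-- from typing import Any, Callable, Dict, Optional, TypeVar, Generic, List
--
-- def check_for_orphans(transitions: Dict[str, List[str]]) -> List[str]:
--     """Check for states with no incoming transitions"""
--     incoming = set()
--     for to_states in transitions.values():
--         incoming.update(to_states)
--
--     orphans = []
--     for state in transitions.keys():
--         if state not in incoming:
--             orphans.append(state)
--
--     return orphans
-- ===== SOURCE B (Python) =====
-- def check_for_orphans(transitions):
--     """Check for states with no incoming transitions"""
--     return [state for state in transitions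
--             if not any(state in to_states for to_states in transitions.values())]
-- ===== Notes on version B (the rewrite author's own statement) =====
-- stated objective: idiomatic
-- what changed: Drops the prebuilt 'incoming' set and the two accumulator loops: a single list comprehension over the keys decides orphanhood by scanning the transition lists directly with any().
import Mathlib
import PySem

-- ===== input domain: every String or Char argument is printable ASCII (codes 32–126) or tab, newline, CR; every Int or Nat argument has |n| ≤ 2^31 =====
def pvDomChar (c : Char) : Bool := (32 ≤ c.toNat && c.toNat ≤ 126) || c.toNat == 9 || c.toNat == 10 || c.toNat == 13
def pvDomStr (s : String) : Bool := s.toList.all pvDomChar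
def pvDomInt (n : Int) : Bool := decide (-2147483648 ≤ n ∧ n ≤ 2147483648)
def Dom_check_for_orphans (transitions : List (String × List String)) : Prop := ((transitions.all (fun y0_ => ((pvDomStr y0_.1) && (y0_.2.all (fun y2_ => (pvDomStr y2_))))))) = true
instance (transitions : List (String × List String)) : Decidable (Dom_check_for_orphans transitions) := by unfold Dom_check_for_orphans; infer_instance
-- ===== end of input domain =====

-- B replaces A's prebuilt 'incoming' set and its two loops by one list comprehension
-- that decides orphanhood by scanning the transition lists directly (idiomatic; not faster).

-- ===== PORT A =====
def check_for_orphans (transitions : List (String × List String)) : List String :=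
  let incoming : PySem.Set String :=
    transitions.foldl (fun acc p => PySem.Set.update acc p.2) PySem.Set.empty
  transitions.foldl
    (fun orphans p => if PySem.Set.contains incoming p.1 then orphans else orphans ++ [p.1]) []

-- ===== PORT B =====
def check_for_orphans_alt (transitions : List (String × List String)) : List String :=
  (transitions.map Prod.fst).filter
    (fun state => ! transitions.any (fun p => p.2.contains state))

-- ===== PRECONDITION & SPEC =====
def Spec_check_for_orphans (transitions : List (String × List String)) (out : List String) : Prop := out = check_for_orphans_alt transitions
instance (transitions : List (String × List String)) (out : List String) : Decidable (Spec_check_for_orphans transitions out) := by unfold Spec_check_for_orphans; infer_instance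

-- ===== CLAIM (what is proved, stated in full; the proofs are below) =====
def Claim_equal_check_for_orphans : Prop := ∀ (transitions : List (String × List String)), Dom_check_for_orphans transitions → Spec_check_for_orphans transitions (check_for_orphans transitions)

-- ===== LEMMAS AND PROOFS =====

theorem mem_foldl_update {α β : Type} [BEq α] [LawfulBEq α] (f : β → List α)
    (t : List β) (acc : PySem.Set α) (s : α) :
    s ∈ t.foldl (fun acc p => PySem.Set.update acc (f p)) acc ↔ s ∈ acc ∨ ∃ p ∈ t, s ∈ f p := by
  induction t generalizing acc with
  | nil => simp
  | cons q t ih =>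
      simp [List.foldl_cons, ih, PySem.Set.mem_update]
      tauto

theorem foldl_funext {α β : Type} (f g : α → β → α) (h : ∀ a b, f a b = g a b)
    (l : List β) (a : α) : l.foldl f a = l.foldl g a := by
  have hfg : f = g := funext fun a => funext fun b => h a b
  rw [hfg]

-- ===== VERDICT (by name: the statement is the Claim_ definition above) =====
theorem check_for_orphans_spec : Claim_equal_check_for_orphans := by
  intro t _
  show check_for_orphans t = check_for_orphans_alt t
  unfold check_for_orphans check_for_orphans_alt
  have hmem : ∀ s : String,
      (PySem.Set.contains (t.foldl (fun acc p => PySem.Set.update acc p.2) PySem.Set.empty) s)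
        = t.any (fun p => p.2.contains s) := by
    intro s
    rcases h : t.any (fun p => p.2.contains s) with _ | _
    · simp only [Bool.eq_false_iff, ne_eq]
      intro hc
      have hm := (PySem.Set.contains_iff _ _).mp hc
      rw [mem_foldl_update] at hm
      rw [List.any_eq_false] at h
      rcases hm with h' | ⟨p, hp, hs⟩
      · simp [PySem.Set.empty] at h'
      · exact h p hp (by simpa using hs)
    · apply (PySem.Set.contains_iff _ _).mpr
      rw [mem_foldl_update]
      right
      simp only [List.any_eq_true] at h
      rcases h with ⟨p, hp, hs⟩
      exact ⟨p, hp, by simpa using hs⟩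
  have hif : ∀ (o : List String) (p : String × List String),
      (if PySem.Set.contains (t.foldl (fun acc p => PySem.Set.update acc p.2) PySem.Set.empty) p.1
        then o else o ++ [p.1])
      = (if (! t.any (fun q => q.2.contains p.1)) = true then o ++ [p.1] else o) := by
    intro o p
    rw [hmem p.1]
    cases t.any (fun q => q.2.contains p.1) <;> simp
  calc t.foldl (fun orphans p =>
          if PySem.Set.contains (t.foldl (fun acc p => PySem.Set.update acc p.2) PySem.Set.empty) p.1
          then orphans else orphans ++ [p.1]) []
      = t.foldl (fun orphans p =>
          if (! t.any (fun q => q.2.contains p.1)) = true then orphans ++ [p.1] else orphans) [] := by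
        apply foldl_funext
        intro o p
        exact hif o p
    _ = (t.map Prod.fst).filter (fun state => ! t.any (fun p => p.2.contains state)) := by
        rw [PySem.List.foldl_append_if (fun p => ! t.any (fun q => q.2.contains p.1)) Prod.fst]
        simp [List.filter_map, Function.comp_def]
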